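-- pv_equiv track=rewrite | github.com/MScience/Dragonfly-Python | MScience.Sms.py | parseForMessage
-- ===== SOURCE A (Python) =====
-- def parseForMessage(message):
--     builder = str()
--
--     parseCount = 0
--     while parseCount < 8:
--         endOfCurrentItem = message.find(",")
--
--         if endOfCurrentItem == -1:
--             builder = builder + " " + message
--             #builder.Append(message)
--             break
--
--         messagePart = message[: endOfCurrentItem]
--
--         builder = ''.join([builder, messagePart, ','])
--         message = message[endOfCurrentItem + 1:]
--
--         if parseCount == 7:
--             byteCount = int(messagePart)
--             messageBytes = str.encode(message,encoding='ascii')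
--             textBytes = messageBytes[:byteCount]
--             text = textBytes.decode('ascii')
--             builder = ''.join([builder,text])
--
--         parseCount+=1
--
--     return builder
-- ===== SOURCE B (Python) =====
-- def parseForMessage(message):
--     parts = message.split(',', 8)
--     if len(parts) < 9:
--         return ''.join(p + ',' for p in parts[:-1]) + ' ' + parts[-1]
--     header = ''.join(p + ',' for p in parts[:8])
--     byteCount = int(parts[7])
--     payload = parts[8].encode('ascii')[:byteCount].decode('ascii')
--     return header + payload
-- ===== Notes on version B (the rewrite author's own statement) =====
-- stated objective: idiomatic
-- what changed: Replaces the incremental eight-step find/slice/append loop with a single upfront split(',', 8) and one branch on the number of parts; Pre_ excludes only inputs where the eighth field is not int-parsable (both A and B raise ValueError there).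
import Mathlib
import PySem

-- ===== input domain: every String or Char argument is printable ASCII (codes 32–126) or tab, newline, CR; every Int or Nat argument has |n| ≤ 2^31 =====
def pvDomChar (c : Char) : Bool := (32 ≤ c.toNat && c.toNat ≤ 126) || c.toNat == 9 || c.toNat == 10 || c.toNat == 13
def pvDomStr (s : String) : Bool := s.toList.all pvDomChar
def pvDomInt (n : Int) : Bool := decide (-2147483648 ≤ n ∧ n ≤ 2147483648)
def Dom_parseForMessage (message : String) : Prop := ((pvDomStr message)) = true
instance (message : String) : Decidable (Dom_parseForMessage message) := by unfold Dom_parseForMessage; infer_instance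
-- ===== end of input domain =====

-- B replaces the incremental find/slice/append loop with one upfront split(',', 8) plus a branch.

-- ===== PORT A =====
-- while parseCount < 8, remaining = 8 - parseCount; `n = 0` is Python's `parseCount == 7`.
-- str.encode('ascii')/decode('ascii') are byte-identical on the ASCII domain, so the byte
-- slice messageBytes[:byteCount] is ported as the character slice (exact on Dom).
-- `none` is Python's ValueError from int(messagePart); excluded by Pre_.
def parseAgo (builder msg : List Char) : Nat → Option (List Char)
  | 0 => some builder
  | n + 1 =>
    let e := PySem.Chars.find msg [',']
    if e = -1 then some (builder ++ ' ' :: msg)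
    else
      let part := PySem.Chars.slice msg none (some e)
      let b2 := builder ++ part ++ [',']
      let msg2 := PySem.Chars.slice msg (some (e + 1)) none
      if n = 0 then
        match PySem.Int.ofChars? part with
        | none => none
        | some byteCount =>
          parseAgo (b2 ++ PySem.Chars.slice msg2 none (some byteCount)) msg2 n
      else parseAgo b2 msg2 n

def parseForMessage (message : String) : String :=
  String.ofList ((parseAgo [] message.toList 8).getD [])

-- ===== PORT B =====
-- transliteration of Source B: parts = message.split(',', 8); one branch on len(parts).
def parseForMessage_alt (message : String) : String :=
  let parts := PySem.Chars.splitOnMax message.toList [','] 8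
  String.ofList <|
    if parts.length < 9 then
      PySem.Chars.join [] (parts.dropLast.map (· ++ [','])) ++ ' ' :: parts.getLastD []
    else
      match PySem.Int.ofChars? (parts.getD 7 []) with
      | none => []   -- int() ValueError; excluded by Pre_
      | some byteCount =>
        PySem.Chars.join [] ((parts.take 8).map (· ++ [','])) ++
          PySem.Chars.slice (parts.getD 8 []) none (some byteCount)

-- ===== PRECONDITION & SPEC =====
-- Pre_ excludes exactly the inputs where int(<eighth comma-separated field>) raises ValueError
-- (reached only when the message has at least 8 commas); both A and B raise there.
def Pre_parseForMessage (message : String) : Prop :=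
  (PySem.Chars.splitOnMax message.toList [','] 8).length = 9 →
    PySem.Int.ofChars? ((PySem.Chars.splitOnMax message.toList [','] 8).getD 7 []) ≠ none
instance (message : String) : Decidable (Pre_parseForMessage message) := by
  unfold Pre_parseForMessage; infer_instance

def pvWitness_parseForMessage : String := "a,bc,1,2,3,4,5,6,hello,world"

def Spec_parseForMessage (message : String) (out : String) : Prop := out = parseForMessage_alt message
instance (message : String) (out : String) : Decidable (Spec_parseForMessage message out) := by
  unfold Spec_parseForMessage; infer_instance

-- ===== CLAIM (what is proved, stated in full; the proofs are below) =====
def Claim_equal_parseForMessage : Prop := ∀ (message : String), Dom_parseForMessage message → Pre_parseForMessage message → Spec_parseForMessage message (parseForMessage message)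

-- ===== LEMMAS AND PROOFS =====

lemma findGo_nonneg (c0 : Char) (l : List Char) : ∀ k : Nat,
    PySem.Chars.find.go [c0] l k = -1 ∨ (k:Int) ≤ PySem.Chars.find.go [c0] l k := by
  induction l with
  | nil => intro k; left; simp [PySem.Chars.find.go]
  | cons c t ih =>
    intro k
    simp only [PySem.Chars.find.go]
    split
    · right; simp
    · rcases ih (k+1) with h | h
      · left; exact h
      · right; omega

lemma findGo_shift (c0 : Char) (l : List Char) : ∀ k : Nat,
    PySem.Chars.find.go [c0] l k =
      if PySem.Chars.find.go [c0] l 0 = -1 then -1 else PySem.Chars.find.go [c0] l 0 + k := by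
  induction l with
  | nil => intro k; simp [PySem.Chars.find.go]
  | cons c t ih =>
    intro k
    simp only [PySem.Chars.find.go]
    split
    · simp
    · rw [ih (k+1), ih 1]
      rcases findGo_nonneg c0 t 0 with h | h <;> split <;> omega

lemma find_single (l : List Char) (c0 : Char) :
    PySem.Chars.find l [c0] =
      if c0 ∈ l then ((l.takeWhile (· ≠ c0)).length : Int) else -1 := by
  induction l with
  | nil => simp [PySem.Chars.find, PySem.Chars.find.go]
  | cons c t ih =>
    show PySem.Chars.find.go [c0] (c :: t) 0 = _
    simp only [PySem.Chars.find.go, List.isPrefixOf, Bool.and_true]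
    by_cases hc : c0 = c
    · subst hc; simp
    · have hne : (c0 == c) = false := by simp [hc]
      rw [hne]
      simp only [Bool.false_eq_true, if_false]
      rw [findGo_shift c0 t 1]
      have := ih
      simp only [PySem.Chars.find] at this
      rw [this]
      by_cases hm : c0 ∈ t
      · have hgo : PySem.Chars.find.go [c0] t 0 = ((t.takeWhile (· ≠ c0)).length : Int) := by
          simpa [hm] using this
        simp [hm, hc, Ne.symm hc]
      · simp [hm, hc]

def splitC : Nat → List Char → List (List Char)
  | 0, l => [l]
  | m + 1, l =>
    let e := PySem.Chars.find l [',']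
    if e = -1 then [l]
    else l.take e.toNat :: splitC m (l.drop (e.toNat + 1))

lemma splitC_cons (m : Nat) (c : Char) (rest : List Char) :
    splitC (m + 1) (c :: rest) =
      if c = ',' then [] :: splitC m rest
      else (splitC (m + 1) rest).modifyHead (c :: ·) := by
  by_cases hc : c = ','
  · subst hc
    simp [splitC, find_single]
  · by_cases hm : ',' ∈ rest
    · have h1 : PySem.Chars.find (c :: rest) [','] = ((rest.takeWhile (· ≠ ',')).length : Int) + 1 := by
        rw [find_single]
        simp [hm, hc, Ne.symm hc]
      have h2 : PySem.Chars.find rest [','] = ((rest.takeWhile (· ≠ ',')).length : Int) := by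
        rw [find_single]; simp [hm]
      have hlen : (rest.takeWhile (· ≠ ',')).length < rest.length := by
        have h := List.takeWhile_prefix (l := rest) (p := (· ≠ ','))
        rcases lt_or_eq_of_le h.length_le with h' | h'
        · exact h'
        · exfalso
          have heq : rest.takeWhile (· ≠ ',') = rest := h.eq_of_length h'
          have := List.mem_takeWhile_imp (l := rest) (p := (· ≠ ',')) (heq ▸ hm)
          simp at this
      simp only [splitC, h1, h2, hc, if_false]
      have hne1 : ((rest.takeWhile (· ≠ ',')).length : Int) + 1 ≠ -1 := by omega
      have hne2 : ((rest.takeWhile (· ≠ ',')).length : Int) ≠ -1 := by omega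
      rw [if_neg hne1, if_neg hne2]
      have ht1 : (((rest.takeWhile (· ≠ ',')).length : Int) + 1).toNat = (rest.takeWhile (· ≠ ',')).length + 1 := by omega
      have ht2 : (((rest.takeWhile (· ≠ ',')).length : Int)).toNat = (rest.takeWhile (· ≠ ',')).length := by omega
      simp [List.take_succ_cons, List.drop_succ_cons]
    · have h1 : PySem.Chars.find (c :: rest) [','] = -1 := by
        rw [find_single]; simp [hm, Ne.symm hc]
      have h2 : PySem.Chars.find rest [','] = -1 := by
        rw [find_single]; simp [hm]
      simp [splitC, h1, h2, hc]

lemma splitC_ne_nil (m : Nat) (l : List Char) : splitC m l ≠ [] := by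
  cases m
  · simp [splitC]
  · simp only [splitC]; split <;> simp

lemma go_spec (fuel : Nat) : ∀ (m : Nat) (l cur : List Char) (acc : List (List Char)), l.length < fuel →
    PySem.Chars.splitOnMax.go [','] fuel m l cur acc =
      acc.reverse ++ (splitC m l).modifyHead (cur.reverse ++ ·) := by
  induction fuel with
  | zero => intro m l cur acc h; omega
  | succ f ih =>
    intro m l cur acc h
    cases l with
    | nil =>
      cases m <;> simp [PySem.Chars.splitOnMax.go, splitC, find_single]
    | cons c rest =>
      cases m with
      | zero =>
        simp [PySem.Chars.splitOnMax.go, splitC]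
      | succ m' =>
        simp only [PySem.Chars.splitOnMax.go]
        by_cases hc : c = ','
        · subst hc
          have hpre : [','].isPrefixOf (',' :: rest) = true := by simp [List.isPrefixOf]
          simp only [hpre, if_true, Nat.succ_ne_zero, if_false, Nat.succ_sub_one]
          rw [ih m' (List.drop [','].length (',' :: rest)) [] (cur.reverse :: acc) (by simp at h ⊢; omega)]
          rw [splitC_cons]
          simp
          cases hsp : splitC m' rest with
          | nil => exact absurd hsp (splitC_ne_nil m' rest)
          | cons a t => simp
        · have hpre : [c].isPrefixOf (c :: rest) = true := by simp [List.isPrefixOf]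
          have hpre2 : [','].isPrefixOf (c :: rest) = false := by simp [List.isPrefixOf]; exact fun h => absurd h.symm hc
          simp only [hpre2, Bool.false_eq_true, if_false, Nat.succ_ne_zero]
          rw [ih (m' + 1) rest (c :: cur) acc (by simp at h ⊢; omega)]
          rw [splitC_cons]
          simp [hc]
          cases hsp : splitC (m' + 1) rest with
          | nil => exact absurd hsp (splitC_ne_nil (m' + 1) rest)
          | cons a t => simp

lemma splitOnMax_eq_splitC (l : List Char) (m : Nat) :
    PySem.Chars.splitOnMax l [','] (m : Int) = splitC m l := by
  unfold PySem.Chars.splitOnMax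
  rw [if_neg (by omega)]
  rw [go_spec (l.length + 1) (m : Int).toNat l [] [] (by omega)]
  simp only [Int.toNat_natCast, List.reverse_nil, List.nil_append]
  cases hsp : splitC m l with
  | nil => exact absurd hsp (splitC_ne_nil m l)
  | cons a t => simp
def outSpec (n : Nat) (l : List Char) : Option (List Char) :=
  let ps := splitC n l
  if ps.length < n + 1 then
    some (PySem.Chars.join [] (ps.dropLast.map (· ++ [','])) ++ ' ' :: ps.getLastD [])
  else
    match PySem.Int.ofChars? (ps.getD (n - 1) []) with
    | none => none
    | some bc =>
      some (PySem.Chars.join [] ((ps.take n).map (· ++ [','])) ++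
        PySem.Chars.slice (ps.getD n []) none (some bc))

lemma joinNil (xs : List (List Char)) : PySem.Chars.join [] xs = xs.flatten := by
  induction xs with
  | nil => simp [PySem.Chars.join_nil]
  | cons a t ih =>
    cases t with
    | nil => simp [PySem.Chars.join_singleton]
    | cons b t' => rw [PySem.Chars.join_cons_cons]; simp_all

lemma splitC_length_le (m : Nat) : ∀ l, (splitC m l).length ≤ m + 1 := by
  induction m with
  | zero => intro l; simp [splitC]
  | succ m ih =>
    intro l
    simp only [splitC]
    split
    · simp
    · simpa using Nat.succ_le_succ (ih _)

lemma outSpec_step (n : Nat) (l : List Char) (hn : 1 ≤ n)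
    (hf : ¬ PySem.Chars.find l [','] = -1) :
    outSpec (n + 1) l =
      (outSpec n (l.drop ((PySem.Chars.find l [',']).toNat + 1))).map
        (l.take (PySem.Chars.find l [',']).toNat ++ ',' :: ·) := by
  have hsp : splitC (n + 1) l =
      l.take (PySem.Chars.find l [',']).toNat ::
        splitC n (l.drop ((PySem.Chars.find l [',']).toNat + 1)) := by
    simp only [splitC, hf, if_false]
  cases hps : splitC n (l.drop ((PySem.Chars.find l [',']).toNat + 1)) with
  | nil => exact absurd hps (splitC_ne_nil _ _)
  | cons a t =>
    rw [hps] at hsp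
    simp only [outSpec, hsp, hps, joinNil, List.length_cons]
    by_cases hlt : t.length + 1 < n + 1
    · rw [if_pos (by omega), if_pos hlt]
      simp [List.dropLast_cons_of_ne_nil]
    · rw [if_neg (by omega), if_neg hlt]
      have hgd1 : (l.take (PySem.Chars.find l [',']).toNat :: a :: t).getD (n + 1 - 1) [] =
          (a :: t).getD (n - 1) [] := by
        have hidx : n + 1 - 1 = (n - 1) + 1 := by omega
        rw [hidx]; simp
      rw [hgd1]
      cases PySem.Int.ofChars? ((a :: t).getD (n - 1) []) with
      | none => simp
      | some bc => simp

lemma find_nonneg_of_ne (l : List Char) (hf : ¬ PySem.Chars.find l [','] = -1) :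
    0 ≤ PySem.Chars.find l [','] := by
  have := PySem.Chars.neg_one_le_find l [',']
  omega

lemma parseAgo_found (b l : List Char) (n : Nat) (hn : n ≠ 0)
    (hf : ¬ PySem.Chars.find l [','] = -1) :
    parseAgo b l (n + 1) =
      parseAgo (b ++ PySem.Chars.slice l none (some (PySem.Chars.find l [','])) ++ [','])
        (PySem.Chars.slice l (some (PySem.Chars.find l [','] + 1)) none) n := by
  simp only [parseAgo, hf, if_false, hn]

lemma parseAgo_spec : ∀ (n : Nat), 1 ≤ n → ∀ (b l : List Char),
    parseAgo b l n = (outSpec n l).map (b ++ ·) := by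
  intro n
  induction n with
  | zero => omega
  | succ n ih =>
    intro _ b l
    by_cases hf : PySem.Chars.find l [','] = -1
    · simp only [parseAgo, hf, if_pos]
      have hsp : splitC (n + 1) l = [l] := by simp only [splitC, hf, if_true]
      simp [outSpec, hsp]
    · have h0 : (0:Int) ≤ PySem.Chars.find l [','] := find_nonneg_of_ne l hf
      have hsl1 : PySem.Chars.slice l none (some (PySem.Chars.find l [','])) =
          l.take (PySem.Chars.find l [',']).toNat := by
        simp [PySem.List.slice_to _ h0]
      have hsl2 : PySem.Chars.slice l (some (PySem.Chars.find l [','] + 1)) none =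
          l.drop ((PySem.Chars.find l [',']).toNat + 1) := by
        rw [PySem.Chars.slice_eq_listSlice, PySem.List.slice_from _ (by omega)]
        congr 1
        omega
      cases n with
      | zero =>
        simp only [parseAgo, hf, if_false, hsl1, hsl2]
        have hsp : splitC 1 l =
            [l.take (PySem.Chars.find l [',']).toNat,
             l.drop ((PySem.Chars.find l [',']).toNat + 1)] := by
          simp only [splitC, hf, if_false]
        simp only [outSpec, hsp]
        rcases hoc : PySem.Int.ofChars? (l.take (PySem.Chars.find l [',']).toNat) with _ | bc <;>
          simp [hoc]
      | succ m =>
        rw [parseAgo_found b l (m + 1) (by omega) hf]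
        rw [ih (by omega), hsl1, hsl2]
        rw [outSpec_step (m + 1) l (by omega) hf]
        cases outSpec (m + 1) (l.drop ((PySem.Chars.find l [',']).toNat + 1)) with
        | none => simp
        | some v => simp

-- ===== VERDICT (by name: the statement is the Claim_ definition above) =====
theorem parseForMessage_spec : Claim_equal_parseForMessage := by
  intro message _ hpre
  unfold Spec_parseForMessage parseForMessage parseForMessage_alt
  have h8 : PySem.Chars.splitOnMax message.toList [','] 8 = splitC 8 message.toList := by
    exact_mod_cast splitOnMax_eq_splitC message.toList 8
  rw [parseAgo_spec 8 (by omega) [] message.toList]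
  unfold Pre_parseForMessage at hpre
  rw [h8] at hpre
  unfold outSpec
  rw [h8]
  by_cases hlt : (splitC 8 message.toList).length < 9
  · simp [hlt]
  · have hlen : (splitC 8 message.toList).length = 9 :=
      le_antisymm (by simpa using splitC_length_le 8 message.toList) (by omega)
    rcases hoc : PySem.Int.ofChars? ((splitC 8 message.toList).getD 7 []) with _ | bc
    · exact absurd hoc (hpre hlen)
    · simp only [List.getD_eq_getElem?_getD] at hoc
      simp [hlt, hoc, List.map_take]
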